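-- pv_equiv track=rewrite | github.com/mcsnakey/advent-of-code-2023 | solutions/14/part2.py | run_cycle
-- ===== SOURCE A (Python) =====
-- def run_cycle(board):
--     for i in range(4):
--         col_keys = []
--         new_board = []
--         for col_idx in range(len(board[0])):
--             top_row_score = len(board)
--             next_score = top_row_score
--             row_idx = 0
--             col_key = 0
--             new_row = ['.'] * top_row_score
--             while row_idx < len(board):
--                 if board[row_idx][col_idx] == '#':
--                     next_score = top_row_score - row_idx - 1
--                     new_row[next_score] = '#'
--                 elif board[row_idx][col_idx] == 'O':
--                     col_key += next_score
--                     next_score -= 1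
--                     new_row[next_score] = 'O'
--                 row_idx += 1
--             col_keys.append(col_key)
--             new_board.append(new_row)
--         board = new_board
--     return tuple(col_keys), new_board
-- ===== SOURCE B (Python) =====
-- def _slide(col):
--     """Roll all 'O' rocks in one line toward its front, '#' walls staying put."""
--     out = []
--     o = dots = 0
--     for c in col:
--         if c == '#':
--             out += ['O'] * o + ['.'] * dots + ['#']
--             o = dots = 0
--         elif c == 'O':
--             o += 1
--         else:
--             dots += 1
--     return out + ['O'] * o + ['.'] * dots
--
--
-- def run_cycle(board):
--     for _ in range(4):
--         top = len(board)
--         cols = [_slide([row[j] for row in board]) for j in range(len(board[0]))]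
--         keys = [sum(top - p for p, c in enumerate(t) if c == 'O') for t in cols]
--         board = [t[::-1] for t in cols]
--     return tuple(keys), board
-- ===== Notes on version B (the rewrite author's own statement) =====
-- stated objective: alternative
-- what changed: A tilts by writing '#'/'O' into a preallocated row at arithmetically computed score indices inside a while loop that also accumulates the key; B instead slides each column with a single counting pass that re-packs each '#'-bounded segment from run lengths, reverses the packed column, and computes the key afterwards from the 'O' positions via enumerate.
import Mathlib
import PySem

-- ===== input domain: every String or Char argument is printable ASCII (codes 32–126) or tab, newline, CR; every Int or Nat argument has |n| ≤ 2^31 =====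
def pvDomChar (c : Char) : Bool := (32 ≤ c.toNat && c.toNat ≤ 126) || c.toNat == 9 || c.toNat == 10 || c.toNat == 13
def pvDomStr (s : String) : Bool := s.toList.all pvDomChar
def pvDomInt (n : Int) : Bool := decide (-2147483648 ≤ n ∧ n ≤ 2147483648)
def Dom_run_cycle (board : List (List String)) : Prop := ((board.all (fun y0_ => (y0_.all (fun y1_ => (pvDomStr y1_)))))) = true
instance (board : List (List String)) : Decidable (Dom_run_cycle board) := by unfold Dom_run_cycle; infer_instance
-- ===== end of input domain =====

-- B replaces A's score-indexed writes into a preallocated row by a counting pass that packs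
-- each '#'-bounded segment and then reverses; objective: alternative (same asymptotic cost).

-- ===== PORT A =====
-- the 'while row_idx < len(board)' loop of A, one column at a time; board[row_idx][col_idx]
-- is in range on every input admitted by Pre_run_cycle (getD's default is never read there)
def runColA (j top : Nat) (rows : List (List String)) (i ns : Nat) (key : Int)
    (arr : List String) : Int × List String :=
  match rows with
  | [] => (key, arr)
  | r :: rest =>
    if r.getD j "" = "#" then
      runColA j top rest (i + 1) (top - i - 1) key (arr.set (top - i - 1) "#")
    else if r.getD j "" = "O" then
      runColA j top rest (i + 1) (ns - 1) (key + (ns : Int)) (arr.set (ns - 1) "O")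
    else
      runColA j top rest (i + 1) ns key arr

-- one pass of A's 'for col_idx in range(len(board[0]))' loop (col_keys and new_board appends)
def stepA (board : List (List String)) : List Int × List (List String) :=
  (List.range (board.headD []).length).foldl
    (fun acc j =>
      (acc.1 ++ [(runColA j board.length board 0 board.length 0
                    (List.replicate board.length ".")).1],
       acc.2 ++ [(runColA j board.length board 0 board.length 0
                    (List.replicate board.length ".")).2]))
    ([], [])

def run_cycle (board : List (List String)) : List Int × List (List String) :=
  (List.range 4).foldl (fun acc _ => stepA acc.2) (([] : List Int), board)

-- ===== PORT B =====
-- Source B's _slide: count 'O's and other cells per '#'-bounded segment, emit packed runs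
def slideB (col : List String) (out : List String) (o dots : Nat) : List String :=
  match col with
  | [] => out ++ List.replicate o "O" ++ List.replicate dots "."
  | c :: rest =>
    if c = "#" then
      slideB rest (out ++ List.replicate o "O" ++ List.replicate dots "." ++ ["#"]) 0 0
    else if c = "O" then
      slideB rest out (o + 1) dots
    else
      slideB rest out o (dots + 1)

-- sum(top - p for p, c in enumerate(t) if c == 'O')
def keyB (top : Nat) (t : List String) : Int :=
  (PySem.List.enumerate t).foldl
    (fun s pc => if pc.2 = "O" then s + ((top : Int) - pc.1) else s) 0

-- one pass of Source B's loop body (three comprehensions; row[j] in range under Pre_run_cycle)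
def stepB (board : List (List String)) : List Int × List (List String) :=
  let cols := (List.range (board.headD []).length).map
    (fun j => slideB (board.map (fun row => row.getD j "")) [] 0 0)
  (cols.map (keyB board.length), cols.map List.reverse)

def run_cycle_alt (board : List (List String)) : List Int × List (List String) :=
  (List.range 4).foldl (fun acc _ => stepB acc.2) (([] : List Int), board)

-- ===== PRECONDITION & SPEC =====
-- Pre_ is exactly where Python A returns: an empty board or an empty first row raises
-- IndexError (len(board[0]) / board[0] on the second cycle), and a row shorter than row 0
-- raises IndexError on board[row_idx][col_idx]; rows longer than row 0 are admitted.
def Pre_run_cycle (board : List (List String)) : Prop :=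
  board ≠ [] ∧ (board.headD []).length ≠ 0 ∧
    ∀ r ∈ board, (board.headD []).length ≤ r.length
instance (board : List (List String)) : Decidable (Pre_run_cycle board) := by
  unfold Pre_run_cycle; infer_instance

def pvWitness_run_cycle : List (List String) :=
  [["O", ".", "#"], ["#", "O", "."], [".", "O", "."]]

def Spec_run_cycle (board : List (List String)) (out : List Int × List (List String)) : Prop :=
  out = run_cycle_alt board
instance (board : List (List String)) (out : List Int × List (List String)) :
    Decidable (Spec_run_cycle board out) := by unfold Spec_run_cycle; infer_instance

-- ===== CLAIM (what is proved, stated in full; the proofs are below) =====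
def Claim_equal_run_cycle : Prop :=
  ∀ (board : List (List String)), Dom_run_cycle board → Pre_run_cycle board →
    Spec_run_cycle board (run_cycle board)

-- ===== LEMMAS AND PROOFS =====

-- position-weighted key of a slid column, counting from offset p (B's enumerate sum, recursively)
def gKey (top : Nat) (t : List String) (p : Int) : Int :=
  match t with
  | [] => 0
  | c :: rest => (if c = "O" then (top : Int) - p else 0) + gKey top rest (p + 1)

theorem keyB_foldl (top : Nat) (t : List String) :
    ∀ (s p : Int),
      (PySem.List.enumerate t p).foldl
        (fun s pc => if pc.2 = "O" then s + ((top : Int) - pc.1) else s) s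
      = s + gKey top t p := by
  induction t with
  | nil => intro s p; simp [PySem.List.enumerate, gKey]
  | cons c rest ih =>
    intro s p
    rw [PySem.List.enumerate_cons]
    simp only [List.foldl_cons, gKey]
    rw [ih]
    split_ifs <;> omega

theorem keyB_eq (top : Nat) (t : List String) : keyB top t = gKey top t 0 := by
  unfold keyB
  rw [keyB_foldl top t 0 0, zero_add]

theorem gKey_append (top : Nat) (a b : List String) :
    ∀ p : Int, gKey top (a ++ b) p = gKey top a p + gKey top b (p + a.length) := by
  induction a with
  | nil => intro p; simp [gKey]
  | cons c rest ih =>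
    intro p
    simp only [List.cons_append, gKey, ih (p + 1), List.length_cons]
    push_cast
    ring_nf

theorem gKey_replicate (top : Nat) (c : String) (h : c ≠ "O") :
    ∀ (n : Nat) (p : Int), gKey top (List.replicate n c) p = 0 := by
  intro n
  induction n with
  | zero => intro p; simp [gKey]
  | succ m ih => intro p; simp [List.replicate_succ, gKey, h, ih]

theorem rev_set {α : Type} (l : List α) (k : Nat) (v : α) (h : k < l.length) :
    l.reverse.set k v = (l.set (l.length - 1 - k) v).reverse := by
  apply List.ext_getElem
  · simp
  · intro i h1 h2
    simp only [List.getElem_set, List.getElem_reverse, List.length_set] at *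
    have hi : i < l.length := by simpa using h1
    by_cases hk : k = i
    · subst hk
      rw [if_pos rfl, if_pos (by omega)]
    · rw [if_neg hk, if_neg (by omega)]

theorem set_replicate_mid (v : String) :
    ∀ (d m : Nat),
      (List.replicate (d + 1 + m) (".":String)).set d v
        = List.replicate d "." ++ v :: List.replicate m "." := by
  intro d
  induction d with
  | zero => intro m; rw [Nat.add_comm, List.replicate_succ]; rfl
  | succ e ih =>
    intro m
    have : e + 1 + 1 + m = (e + 1 + m) + 1 := by omega
    rw [this, List.replicate_succ, List.set_cons_succ, ih m, List.replicate_succ]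
    simp

-- the per-column invariant: A's while loop, started in the state reached after having flushed
-- `res`, with `o` pending 'O's and `d` pending blanks, computes B's packed column and key
theorem colA_inv (j top : Nat) (rows : List (List String)) :
    ∀ (res : List String) (o d : Nat) (key0 : Int),
      res.length + o + d + rows.length = top →
      runColA j top rows (res.length + o + d) (top - res.length - o)
          (key0 + gKey top (res ++ List.replicate o "O") 0)
          ((res ++ List.replicate o "O" ++ List.replicate (top - res.length - o) ".").reverse)
        = (key0 + gKey top (slideB (rows.map (fun r => r.getD j "")) res o d) 0,
           (slideB (rows.map (fun r => r.getD j "")) res o d).reverse) := by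
  induction rows with
  | nil =>
    intro res o d key0 h
    simp only [List.length_nil, Nat.add_zero] at h
    have hd : top - res.length - o = d := by omega
    simp only [List.map_nil, slideB, runColA, hd, gKey_append,
      gKey_replicate top "." (by decide), add_zero]
  | cons r rest ih =>
    intro res o d key0 h
    simp only [List.length_cons] at h
    have hresO : (res ++ List.replicate o "O").length = res.length + o := by simp
    have hlen : (res ++ List.replicate o "O" ++
        List.replicate (top - res.length - o) ".").length = top := by
      simp; omega
    simp only [List.map_cons, runColA, slideB]
    by_cases h1 : r.getD j "" = "#"
    · simp only [if_pos h1]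
      have harr : ((res ++ List.replicate o "O" ++
            List.replicate (top - res.length - o) ".").reverse).set
              (top - (res.length + o + d) - 1) "#"
          = ((res ++ List.replicate o "O" ++ List.replicate d "." ++ ["#"]) ++
              List.replicate 0 "O" ++
              List.replicate (top - (res ++ List.replicate o "O" ++
                List.replicate d "." ++ ["#"]).length - 0) ".").reverse := by
        rw [rev_set _ _ _ (by rw [hlen]; omega), hlen]
        congr 1
        have hidx : top - 1 - (top - (res.length + o + d) - 1) = res.length + o + d := by
          omega
        rw [hidx, List.set_append, if_neg (by rw [hresO]; omega), hresO]
        have hsub : res.length + o + d - (res.length + o) = d := by omega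
        have hns : top - res.length - o = d + 1 + (top - res.length - o - d - 1) := by omega
        rw [hsub, hns, set_replicate_mid]
        simp only [List.length_append, List.length_replicate, List.length_cons,
          List.length_nil, hresO]
        have : top - (res.length + o + d + 1) - 0 = top - res.length - o - d - 1 := by omega
        simp [List.append_assoc, this]
      have hkey : key0 + gKey top (res ++ List.replicate o "O") 0
          = key0 + gKey top ((res ++ List.replicate o "O" ++ List.replicate d "." ++ ["#"]) ++
              List.replicate 0 "O") 0 := by
        simp only [List.replicate_zero, List.append_nil, gKey_append,
          gKey_replicate top "." (by decide)]
        simp [gKey]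
      have hi : res.length + o + d + 1
          = (res ++ List.replicate o "O" ++ List.replicate d "." ++ ["#"]).length + 0 + 0 := by
        simp; omega
      have hns2 : top - (res.length + o + d) - 1
          = top - (res ++ List.replicate o "O" ++ List.replicate d "." ++ ["#"]).length - 0 := by
        simp; omega
      rw [harr, hkey, hi, hns2,
        ih (res ++ List.replicate o "O" ++ List.replicate d "." ++ ["#"]) 0 0 key0
          (by simp; omega)]
    · by_cases h2 : r.getD j "" = "O"
      · simp only [if_neg h1, if_pos h2]
        have hns1 : 1 ≤ top - res.length - o := by omega
        have harr : ((res ++ List.replicate o "O" ++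
              List.replicate (top - res.length - o) ".").reverse).set
                (top - res.length - o - 1) "O"
            = (res ++ List.replicate (o + 1) "O" ++
                List.replicate (top - res.length - (o + 1)) ".").reverse := by
          rw [rev_set _ _ _ (by rw [hlen]; omega), hlen]
          congr 1
          have hidx : top - 1 - (top - res.length - o - 1) = res.length + o := by omega
          rw [hidx, List.set_append, if_neg (by rw [hresO]; omega), hresO,
            Nat.sub_self]
          have hns : top - res.length - o = 0 + 1 + (top - res.length - o - 1) := by omega
          rw [hns, set_replicate_mid]
          have : top - res.length - (o + 1) = top - res.length - o - 1 := by omega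
          simp [List.replicate_succ', List.append_assoc, this]
        have hkey : (key0 + gKey top (res ++ List.replicate o "O") 0) +
              ((top - res.length - o : Nat) : Int)
            = key0 + gKey top (res ++ List.replicate (o + 1) "O") 0 := by
          simp [List.replicate_succ' (n := o), ← List.append_assoc, gKey_append, gKey]
          omega
        have hns2 : top - res.length - o - 1 = top - res.length - (o + 1) := by omega
        have hi : res.length + o + d + 1 = res.length + (o + 1) + d := by omega
        rw [harr, hkey, hns2, hi, ih res (o + 1) d key0 (by omega)]
      · simp only [if_neg h1, if_neg h2]
        exact ih res o (d + 1) key0 (by omega)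

theorem colA_spec (j : Nat) (b : List (List String)) :
    runColA j b.length b 0 b.length 0 (List.replicate b.length ".") =
      (gKey b.length (slideB (b.map (fun r => r.getD j "")) [] 0 0) 0,
       (slideB (b.map (fun r => r.getD j "")) [] 0 0).reverse) := by
  have h := colA_inv j b.length b [] 0 0 0 (by simp)
  simpa [gKey, List.reverse_replicate] using h

theorem step_eq (b : List (List String)) : stepA b = stepB b := by
  unfold stepA stepB
  rw [PySem.List.foldl_prod_mk
      (fun a j => a ++ [(runColA j b.length b 0 b.length 0
        (List.replicate b.length ".")).1])
      (fun a j => a ++ [(runColA j b.length b 0 b.length 0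
        (List.replicate b.length ".")).2]),
    PySem.List.foldl_append_singleton_eq_map, PySem.List.foldl_append_singleton_eq_map]
  simp only [List.nil_append, List.map_map]
  have hmap1 : ∀ j ∈ List.range (b.headD []).length,
      (runColA j b.length b 0 b.length 0 (List.replicate b.length ".")).1
        = (keyB b.length ∘ fun j => slideB (List.map (fun row => row.getD j "") b) [] 0 0) j := by
    intro j _
    rw [colA_spec]
    simp [keyB_eq]
  have hmap2 : ∀ j ∈ List.range (b.headD []).length,
      (runColA j b.length b 0 b.length 0 (List.replicate b.length ".")).2
        = (List.reverse ∘ fun j => slideB (List.map (fun row => row.getD j "") b) [] 0 0) j := by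
    intro j _
    rw [colA_spec]
    simp
  rw [List.map_congr_left hmap1, List.map_congr_left hmap2]

theorem run_eq (b : List (List String)) : run_cycle b = run_cycle_alt b := by
  have h4 : List.range 4 = [0, 1, 2, 3] := rfl
  simp only [run_cycle, run_cycle_alt, h4, List.foldl_cons, List.foldl_nil, step_eq]

-- ===== VERDICT (by name: the statement is the Claim_ definition above) =====
theorem run_cycle_spec : Claim_equal_run_cycle := by
  intro board _ _
  unfold Spec_run_cycle
  exact run_eq board
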